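-- pv_equiv track=rewrite | github.com/RhubarbXXIII/EverybodyCodes | 2024/07.py | score_path_on_track
-- ===== SOURCE A (Python) =====
-- def score_path_on_track(path: list[str], track: list[str], loops: int = 1) -> int:
--     score = 0
--     power = 10
--
--     for i in range(loops * len(track)):
--         if track[i % len(track)] == '+':
--             power += 1
--         elif track[i % len(track)] == '-':
--             power -= 1
--         elif path[i % len(path)] == '+':
--             power += 1
--         elif path[i % len(path)] == '-':
--             power -= 1
--
--         score += power
--
--     return score
-- ===== SOURCE B (Python) =====
-- def score_path_on_track(path: list[str], track: list[str], loops: int = 1) -> int: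
--     T = len(track)
--     N = loops * T
--     if N <= 0:
--         return 0
--     P = len(path)
--     t, p = T, P
--     while p:
--         t, p = p, t % p
--     L = T * P // t  # lcm of the two period lengths
--
--     # simulate ONE period of L steps; pw[j] = power after step j
--     power = 10
--     pw = []
--     for j in range(L):
--         c = track[j % T]
--         if c == '+':
--             power += 1
--         elif c == '-':
--             power -= 1
--         else:
--             c = path[j % P]
--             if c == '+':
--                 power += 1
--             elif c == '-':
--                 power -= 1
--         pw.append(power)
--
--     D = power - 10          # net power change per period
--     C = sum(pw)             # score contributed by the first period
--     q, r = divmod(N, L)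
--     Cr = sum(pw[:r])
--     return q * C + L * D * q * (q - 1) // 2 + Cr + r * q * D
-- ===== Notes on version B (the rewrite author's own statement) =====
-- stated objective: faster
-- what changed: Replaces A's loop over all loops*len(track) steps by simulating a single period of lcm(len(track),len(path)) steps and summing the repeated blocks with a closed-form arithmetic series.
-- outside the precondition, e.g. on score_path_on_track([], ['+'], 1): A returns 11, B raises ZeroDivisionError
import Mathlib
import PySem

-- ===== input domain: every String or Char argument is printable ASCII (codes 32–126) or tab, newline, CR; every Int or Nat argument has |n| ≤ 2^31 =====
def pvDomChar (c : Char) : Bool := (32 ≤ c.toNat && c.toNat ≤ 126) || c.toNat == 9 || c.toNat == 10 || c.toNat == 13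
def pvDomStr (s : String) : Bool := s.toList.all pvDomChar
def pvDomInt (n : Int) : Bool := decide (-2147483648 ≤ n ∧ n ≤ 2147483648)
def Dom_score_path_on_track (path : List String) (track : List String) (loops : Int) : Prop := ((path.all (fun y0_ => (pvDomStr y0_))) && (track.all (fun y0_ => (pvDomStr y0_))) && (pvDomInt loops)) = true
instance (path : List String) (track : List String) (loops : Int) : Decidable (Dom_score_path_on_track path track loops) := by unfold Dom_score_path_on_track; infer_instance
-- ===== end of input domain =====

-- B replaces A's loop over loops*len(track) steps by one simulated period of lcm(len(track),len(path))
-- steps plus closed-form arithmetic-series summation over the repeated blocks (asymptotically faster).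

-- ===== PORT A =====
def score_path_on_track (path : List String) (track : List String) (loops : Int) : Int :=
  ((PySem.List.pyRange 0 (loops * (track.length : Int)) 1).foldl
    (fun (st : Int × Int) i =>
      let power :=
        if PySem.List.pyGetD track (PySem.Int.mod i (track.length : Int)) "" = "+" then st.2 + 1
        else if PySem.List.pyGetD track (PySem.Int.mod i (track.length : Int)) "" = "-" then st.2 - 1
        else if PySem.List.pyGetD path (PySem.Int.mod i (path.length : Int)) "" = "+" then st.2 + 1
        else if PySem.List.pyGetD path (PySem.Int.mod i (path.length : Int)) "" = "-" then st.2 - 1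
        else st.2
      (st.1 + power, power))
    (0, 10)).1

-- ===== PORT B =====
-- Source B's hand-written Euclid loop `while p: t, p = p, t % p`
def gcdLoop (t p : Nat) : Nat :=
  match p with
  | 0 => t
  | p' + 1 => gcdLoop (p' + 1) (t % (p' + 1))
decreasing_by exact Nat.mod_lt _ (Nat.succ_pos _)

def score_path_on_track_alt (path : List String) (track : List String) (loops : Int) : Int :=
  let T : Int := track.length
  let N : Int := loops * T
  if N ≤ 0 then 0
  else
    let P : Int := path.length
    let g : Int := gcdLoop track.length path.length
    let L : Int := PySem.Int.floordiv (T * P) g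
    let st := (PySem.List.pyRange 0 L 1).foldl
      (fun (st : Int × List Int) j =>
        let c := PySem.List.pyGetD track (PySem.Int.mod j T) ""
        let power :=
          if c = "+" then st.1 + 1
          else if c = "-" then st.1 - 1
          else
            let c2 := PySem.List.pyGetD path (PySem.Int.mod j P) ""
            if c2 = "+" then st.1 + 1
            else if c2 = "-" then st.1 - 1
            else st.1
        (power, st.2 ++ [power]))
      (10, [])
    let D : Int := st.1 - 10
    let C : Int := st.2.sum
    let q : Int := PySem.Int.floordiv N L
    let r : Int := PySem.Int.mod N L
    let Cr : Int := (PySem.List.slice st.2 none (some r)).sum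
    q * C + PySem.Int.floordiv (L * D * q * (q - 1)) 2 + Cr + r * q * D

-- ===== PRECONDITION & SPEC =====
-- Pre_ excludes an empty path with a positive number of steps: there A indexes path lazily and
-- returns only when the track alone decides every step, while B's period arithmetic needs a
-- nonzero path length and raises (as A itself does whenever any step consults the path).
def Pre_score_path_on_track (path : List String) (track : List String) (loops : Int) : Prop :=
  path ≠ [] ∨ loops * (track.length : Int) ≤ 0
instance (path : List String) (track : List String) (loops : Int) : Decidable (Pre_score_path_on_track path track loops) := by unfold Pre_score_path_on_track; infer_instance

def pvWitness_score_path_on_track : List String × List String × Int := (["+", "="], ["-", "x", "x"], 3)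

def Spec_score_path_on_track (path : List String) (track : List String) (loops : Int) (out : Int) : Prop := out = score_path_on_track_alt path track loops
instance (path : List String) (track : List String) (loops : Int) (out : Int) : Decidable (Spec_score_path_on_track path track loops out) := by unfold Spec_score_path_on_track; infer_instance

-- ===== CLAIM (what is proved, stated in full; the proofs are below) =====
def Claim_equal_score_path_on_track : Prop := ∀ (path : List String) (track : List String) (loops : Int), Dom_score_path_on_track path track loops → Pre_score_path_on_track path track loops → Spec_score_path_on_track path track loops (score_path_on_track path track loops)

-- ===== LEMMAS AND PROOFS =====

theorem gcdLoop_eq (t p : Nat) : gcdLoop t p = Nat.gcd p t := by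
  induction p using Nat.strong_induction_on generalizing t with
  | _ p ih =>
    match p with
    | 0 => simp [gcdLoop, Nat.gcd_zero_left]
    | p' + 1 =>
      rw [gcdLoop, ih _ (Nat.mod_lt _ (Nat.succ_pos p')), Nat.gcd_succ]

-- the per-step power change of both programs, as a function of the step index
def pvDelta (path track : List String) (i : Nat) : Int :=
  if PySem.List.pyGetD track (PySem.Int.mod (i : Int) (track.length : Int)) "" = "+" then 1
  else if PySem.List.pyGetD track (PySem.Int.mod (i : Int) (track.length : Int)) "" = "-" then -1
  else if PySem.List.pyGetD path (PySem.Int.mod (i : Int) (path.length : Int)) "" = "+" then 1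
  else if PySem.List.pyGetD path (PySem.Int.mod (i : Int) (path.length : Int)) "" = "-" then -1
  else 0

-- prefix sum of deltas = power - 10 after n steps
def pvS (path track : List String) : Nat → Int
  | 0 => 0
  | n + 1 => pvS path track n + pvDelta path track n

-- cumulative score after n steps
def pvF (path track : List String) : Nat → Int
  | 0 => 0
  | n + 1 => pvF path track n + (10 + pvS path track (n + 1))

theorem foldA_eq (path track : List String) (n : Nat) :
    ((List.range n).foldl
      (fun (st : Int × Int) (k : Nat) =>
        let power :=
          if PySem.List.pyGetD track (PySem.Int.mod (k : Int) (track.length : Int)) "" = "+" then st.2 + 1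
          else if PySem.List.pyGetD track (PySem.Int.mod (k : Int) (track.length : Int)) "" = "-" then st.2 - 1
          else if PySem.List.pyGetD path (PySem.Int.mod (k : Int) (path.length : Int)) "" = "+" then st.2 + 1
          else if PySem.List.pyGetD path (PySem.Int.mod (k : Int) (path.length : Int)) "" = "-" then st.2 - 1
          else st.2
        (st.1 + power, power))
      (0, 10)) = (pvF path track n, 10 + pvS path track n) := by
  induction n with
  | zero => rfl
  | succ n ih =>
    rw [List.range_succ, List.foldl_append, ih]
    simp only [List.foldl_cons, List.foldl_nil]
    have hF : pvF path track (n+1) = pvF path track n + (10 + pvS path track (n+1)) := rfl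
    have hS : pvS path track (n+1) = pvS path track n + pvDelta path track n := rfl
    rw [hF, hS]
    simp only [pvDelta]
    split_ifs <;> simp only [Prod.mk.injEq] <;> constructor <;> ring

theorem foldB_eq (path track : List String) (n : Nat) :
    ((List.range n).foldl
      (fun (st : Int × List Int) (k : Nat) =>
        (if PySem.List.pyGetD track (PySem.Int.mod (k : Int) (track.length : Int)) "" = "+" then st.1 + 1
         else if PySem.List.pyGetD track (PySem.Int.mod (k : Int) (track.length : Int)) "" = "-" then st.1 - 1
         else if PySem.List.pyGetD path (PySem.Int.mod (k : Int) (path.length : Int)) "" = "+" then st.1 + 1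
         else if PySem.List.pyGetD path (PySem.Int.mod (k : Int) (path.length : Int)) "" = "-" then st.1 - 1
         else st.1,
         st.2 ++ [if PySem.List.pyGetD track (PySem.Int.mod (k : Int) (track.length : Int)) "" = "+" then st.1 + 1
         else if PySem.List.pyGetD track (PySem.Int.mod (k : Int) (track.length : Int)) "" = "-" then st.1 - 1
         else if PySem.List.pyGetD path (PySem.Int.mod (k : Int) (path.length : Int)) "" = "+" then st.1 + 1
         else if PySem.List.pyGetD path (PySem.Int.mod (k : Int) (path.length : Int)) "" = "-" then st.1 - 1
         else st.1]))
      (10, [])) = (10 + pvS path track n, (List.range n).map (fun j => 10 + pvS path track (j + 1))) := by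
  induction n with
  | zero => rfl
  | succ n ih =>
    rw [List.range_succ, List.foldl_append, ih, List.map_append]
    simp only [List.foldl_cons, List.foldl_nil, List.map_cons, List.map_nil]
    have hS : pvS path track (n+1) = pvS path track n + pvDelta path track n := rfl
    rw [hS]
    simp only [pvDelta]
    split_ifs <;> simp only [Prod.mk.injEq, List.append_cancel_left_eq, List.cons.injEq, and_true] <;> constructor <;> ring

theorem sum_map_F (path track : List String) (n : Nat) :
    ((List.range n).map (fun j => 10 + pvS path track (j + 1))).sum = pvF path track n := by
  induction n with
  | zero => rfl
  | succ n ih =>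
    rw [List.range_succ, List.map_append, List.sum_append, ih]
    simp [pvF]

theorem delta_periodic (path track : List String) (L' : Nat)
    (hT : (track.length : Int) ∣ (L' : Int)) (hP : (path.length : Int) ∣ (L' : Int))
    (hT0 : 0 < track.length) (hP0 : 0 < path.length) (j k : Nat) :
    pvDelta path track (j + L' * k) = pvDelta path track j := by
  have hmod : ∀ (m : Nat) (hm : 0 < m) (hd : (m : Int) ∣ (L' : Int)),
      PySem.Int.mod ((j + L' * k : Nat) : Int) (m : Int) = PySem.Int.mod (j : Int) (m : Int) := by
    intro m hm hd
    obtain ⟨c, hc⟩ := hd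
    rw [PySem.Int.mod_eq_emod_of_pos (by exact_mod_cast hm),
        PySem.Int.mod_eq_emod_of_pos (by exact_mod_cast hm)]
    push_cast
    rw [hc]
    rw [show (j : Int) + (m : Int) * c * k = (j : Int) + (m : Int) * (c * k) by ring]
    exact Int.add_mul_emod_self_left _ _ _
  unfold pvDelta
  rw [hmod _ hT0 hT, hmod _ hP0 hP]

theorem S_add_L (path track : List String) (L' : Nat)
    (hT : (track.length : Int) ∣ (L' : Int)) (hP : (path.length : Int) ∣ (L' : Int))
    (hT0 : 0 < track.length) (hP0 : 0 < path.length) (i : Nat) :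
    pvS path track (i + L') = pvS path track i + pvS path track L' := by
  induction i with
  | zero => simp [pvS]
  | succ i ih =>
    have h1 : i + 1 + L' = (i + L') + 1 := by omega
    rw [h1]
    show pvS path track (i + L') + pvDelta path track (i + L') = _
    have h2 : i + L' = i + L' * 1 := by omega
    rw [ih, h2, delta_periodic path track L' hT hP hT0 hP0]
    show pvS path track i + pvS path track L' + pvDelta path track i = pvS path track i + pvDelta path track i + pvS path track L'
    ring

theorem S_add_mul (path track : List String) (L' : Nat)
    (hT : (track.length : Int) ∣ (L' : Int)) (hP : (path.length : Int) ∣ (L' : Int))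
    (hT0 : 0 < track.length) (hP0 : 0 < path.length) (k i : Nat) :
    pvS path track (i + L' * k) = pvS path track i + (k : Int) * pvS path track L' := by
  induction k with
  | zero => simp
  | succ k ih =>
    have h1 : i + L' * (k + 1) = (i + L' * k) + L' := by ring
    rw [h1, S_add_L path track L' hT hP hT0 hP0, ih]
    push_cast
    ring

theorem F_add (path track : List String) (L' : Nat)
    (hT : (track.length : Int) ∣ (L' : Int)) (hP : (path.length : Int) ∣ (L' : Int))
    (hT0 : 0 < track.length) (hP0 : 0 < path.length) (k j : Nat) :
    pvF path track (L' * k + j) = pvF path track (L' * k) + pvF path track j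
      + (j : Int) * ((k : Int) * pvS path track L') := by
  induction j with
  | zero => simp [pvF]
  | succ j ih =>
    have h1 : L' * k + (j + 1) = (L' * k + j) + 1 := by omega
    rw [h1]
    show pvF path track (L' * k + j) + (10 + pvS path track (L' * k + j + 1)) = _
    have h2 : L' * k + j + 1 = (j + 1) + L' * k := by omega
    rw [ih, h2, S_add_mul path track L' hT hP hT0 hP0]
    show _ = pvF path track (L' * k) + (pvF path track j + (10 + pvS path track (j + 1))) + _
    push_cast
    ring

theorem F_block (path track : List String) (L' : Nat)
    (hT : (track.length : Int) ∣ (L' : Int)) (hP : (path.length : Int) ∣ (L' : Int))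
    (hT0 : 0 < track.length) (hP0 : 0 < path.length) (k : Nat) :
    2 * pvF path track (L' * k) = 2 * (k : Int) * pvF path track L'
      + (L' : Int) * pvS path track L' * (k : Int) * ((k : Int) - 1) := by
  induction k with
  | zero => simp [pvF]
  | succ k ih =>
    have h1 : L' * (k + 1) = L' * k + L' := by ring
    rw [h1, F_add path track L' hT hP hT0 hP0]
    push_cast
    push_cast at ih
    linear_combination ih

-- ===== VERDICT (by name: the statement is the Claim_ definition above) =====
theorem score_path_on_track_spec : Claim_equal_score_path_on_track := by
  intro path track loops _hDom hPre
  unfold Spec_score_path_on_track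
  by_cases hN : loops * (track.length : Int) ≤ 0
  · have hA : score_path_on_track path track loops = 0 := by
      unfold score_path_on_track
      rw [PySem.List.pyRange_one_eq_nil hN]
      rfl
    have hB : score_path_on_track_alt path track loops = 0 := by
      simp only [score_path_on_track_alt, if_pos hN]
    rw [hA, hB]
  · have hA : score_path_on_track path track loops
        = pvF path track (loops * (track.length : Int)).toNat := by
      unfold score_path_on_track
      rw [PySem.List.pyRange_one, List.foldl_map]
      simp only [zero_add, sub_zero]
      rw [foldA_eq]
    rw [hA]
    simp only [score_path_on_track_alt, if_neg hN]
    rw [not_le] at hN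
    have hT0 : 0 < track.length := by
      rcases Nat.eq_zero_or_pos track.length with h | h
      · rw [h] at hN; simp at hN
      · exact h
    have hP0 : 0 < path.length := by
      rcases hPre with h | h
      · exact List.length_pos_iff.mpr h
      · exact absurd h (not_le.mpr hN)
    have hL : PySem.Int.floordiv ((track.length : Int) * (path.length : Int))
        ((gcdLoop track.length path.length : Nat) : Int)
        = ((Nat.lcm track.length path.length : Nat) : Int) := by
      rw [gcdLoop_eq, Nat.gcd_comm,
        show ((track.length : Int) * (path.length : Int)) = ((track.length * path.length : Nat) : Int) by push_cast; ring,
        PySem.Int.floordiv_natCast]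
      rfl
    rw [hL]
    have hL0 : (0 : Int) < ((Nat.lcm track.length path.length : Nat) : Int) := by
      exact_mod_cast Nat.lcm_pos hT0 hP0
    rw [PySem.List.pyRange_one, List.foldl_map]
    simp only [zero_add, sub_zero]
    rw [foldB_eq]
    simp only [Int.toNat_natCast]
    rw [sum_map_F]
    have hrpos : 0 ≤ PySem.Int.mod (loops * (track.length : Int)) ((Nat.lcm track.length path.length : Nat) : Int) :=
      PySem.Int.mod_nonneg _ hL0
    have hrlt : PySem.Int.mod (loops * (track.length : Int)) ((Nat.lcm track.length path.length : Nat) : Int)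
        < ((Nat.lcm track.length path.length : Nat) : Int) := PySem.Int.mod_lt _ hL0
    rw [show PySem.Int.mod (loops * (track.length : Int)) ((Nat.lcm track.length path.length : Nat) : Int)
        = (((PySem.Int.mod (loops * (track.length : Int)) ((Nat.lcm track.length path.length : Nat) : Int)).toNat : Nat) : Int)
      from (Int.toNat_of_nonneg hrpos).symm]
    rw [PySem.List.slice_to_natCast]
    rw [← List.map_take, List.take_range]
    rw [Nat.min_eq_left (by omega), sum_map_F]
    rw [PySem.Int.floordiv_eq_ediv_of_pos hL0,
        PySem.Int.floordiv_eq_ediv_of_pos (show (0:Int) < 2 by norm_num),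
        PySem.Int.mod_eq_emod_of_pos hL0]
    have hT : (track.length : Int) ∣ ((Nat.lcm track.length path.length : Nat) : Int) :=
      Int.natCast_dvd_natCast.mpr (Nat.dvd_lcm_left _ _)
    have hP : (path.length : Int) ∣ ((Nat.lcm track.length path.length : Nat) : Int) :=
      Int.natCast_dvd_natCast.mpr (Nat.dvd_lcm_right _ _)
    have hq0 : 0 ≤ loops * (track.length : Int) / ((Nat.lcm track.length path.length : Nat) : Int) :=
      Int.ediv_nonneg (le_of_lt hN) (le_of_lt hL0)
    have e1 : (((loops * (track.length : Int) / ((Nat.lcm track.length path.length : Nat) : Int)).toNat : Nat) : Int)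
        = loops * (track.length : Int) / ((Nat.lcm track.length path.length : Nat) : Int) :=
      Int.toNat_of_nonneg hq0
    have e2 : (((loops * (track.length : Int) % ((Nat.lcm track.length path.length : Nat) : Int)).toNat : Nat) : Int)
        = loops * (track.length : Int) % ((Nat.lcm track.length path.length : Nat) : Int) := by
      rw [PySem.Int.mod_eq_emod_of_pos hL0] at hrpos
      exact Int.toNat_of_nonneg hrpos
    have hsplit : (loops * (track.length : Int)).toNat
        = Nat.lcm track.length path.length * (loops * (track.length : Int) / ((Nat.lcm track.length path.length : Nat) : Int)).toNat
          + (loops * (track.length : Int) % ((Nat.lcm track.length path.length : Nat) : Int)).toNat := by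
      have h1 : (((loops * (track.length : Int)).toNat : Nat) : Int)
          = ((Nat.lcm track.length path.length * (loops * (track.length : Int) / ((Nat.lcm track.length path.length : Nat) : Int)).toNat
          + (loops * (track.length : Int) % ((Nat.lcm track.length path.length : Nat) : Int)).toNat : Nat) : Int) := by
        rw [Int.toNat_of_nonneg (le_of_lt hN)]
        push_cast
        rw [e1, e2]
        linarith [Int.mul_ediv_add_emod (loops * (track.length : Int)) ((Nat.lcm track.length path.length : Nat) : Int)]
      exact_mod_cast h1
    rw [hsplit, F_add path track (Nat.lcm track.length path.length) hT hP hT0 hP0]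
    have hFB := F_block path track (Nat.lcm track.length path.length) hT hP hT0 hP0
      (loops * (track.length : Int) / ((Nat.lcm track.length path.length : Nat) : Int)).toNat
    rw [← e1, ← e2]
    have hX : ((Nat.lcm track.length path.length : Nat) : Int)
          * (10 + pvS path track (Nat.lcm track.length path.length) - 10)
          * (((loops * (track.length : Int) / ((Nat.lcm track.length path.length : Nat) : Int)).toNat : Nat) : Int)
          * ((((loops * (track.length : Int) / ((Nat.lcm track.length path.length : Nat) : Int)).toNat : Nat) : Int) - 1)
        = 2 * (pvF path track (Nat.lcm track.length path.length * (loops * (track.length : Int) / ((Nat.lcm track.length path.length : Nat) : Int)).toNat)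
          - (((loops * (track.length : Int) / ((Nat.lcm track.length path.length : Nat) : Int)).toNat : Nat) : Int)
            * pvF path track (Nat.lcm track.length path.length)) := by
      linear_combination -hFB
    rw [hX, Int.mul_ediv_cancel_left _ (by norm_num : (2:Int) ≠ 0)]
    simp only [Int.toNat_natCast]
    ring
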